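-- pv_equiv track=rewrite | github.com/H4ck3rZ0n3/social-media-opinion-analysis | src/topic_effectiveness_classifier.py | classify_topic_effectiveness
-- ===== SOURCE A (Python) =====
-- def classify_topic_effectiveness(comments):
--     if not isinstance(comments, list):
--         raise ValueError("Input should be a list of dictionaries.")
--
--     for comment in comments:
--         if not isinstance(comment, dict) or 'type' not in comment:
--             raise ValueError("Each comment must be a dictionary with a 'type' key.")
--
--     claim_count = sum(1 for c in comments if c.get('type') == 'Claim')
--     counter_count = sum(1 for c in comments if c.get('type') in ['Counterclaim', 'Rebuttal'])
--
--     if claim_count > counter_count: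
--         return "Effective"
--     elif claim_count == counter_count:
--         return "Adequate"
--     else:
--         return "Ineffective"
-- ===== SOURCE B (Python) =====
-- def classify_topic_effectiveness(comments):
--     if not isinstance(comments, list):
--         raise ValueError("Input should be a list of dictionaries.")
--
--     # single pass with a signed balance: +1 per Claim, -1 per Counterclaim/Rebuttal;
--     # the classification depends only on the sign of the balance.
--     score = 0
--     for comment in comments:
--         if not isinstance(comment, dict) or 'type' not in comment:
--             raise ValueError("Each comment must be a dictionary with a 'type' key.")
--         t = comment['type']
--         if t == 'Claim':
--             score += 1
--         elif t in ('Counterclaim', 'Rebuttal'):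
--             score -= 1
--
--     if score > 0:
--         return "Effective"
--     elif score == 0:
--         return "Adequate"
--     else:
--         return "Ineffective"
-- ===== Notes on version B (the rewrite author's own statement) =====
-- stated objective: alternative
-- what changed: Replaces A's two counting scans plus comparison of two tallies by a single pass maintaining one signed balance (+1 per Claim, -1 per Counterclaim/Rebuttal) and classifying by the sign of that balance.
import Mathlib
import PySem

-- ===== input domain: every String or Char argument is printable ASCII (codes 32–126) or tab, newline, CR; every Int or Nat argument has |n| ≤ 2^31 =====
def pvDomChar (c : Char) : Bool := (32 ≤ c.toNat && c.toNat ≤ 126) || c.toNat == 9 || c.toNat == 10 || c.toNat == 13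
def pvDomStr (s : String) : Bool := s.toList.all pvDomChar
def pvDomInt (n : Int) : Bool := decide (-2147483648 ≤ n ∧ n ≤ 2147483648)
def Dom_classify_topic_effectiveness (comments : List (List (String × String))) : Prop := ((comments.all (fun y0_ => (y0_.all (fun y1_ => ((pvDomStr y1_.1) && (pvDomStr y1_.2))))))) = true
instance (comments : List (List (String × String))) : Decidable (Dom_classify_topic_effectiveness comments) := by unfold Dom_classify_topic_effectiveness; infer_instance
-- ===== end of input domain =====

-- ===== PORT A =====
-- B replaces A's two counting scans and tally comparison by one pass keeping a signed balance,
-- classifying by its sign (alternative decomposition, same cost).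
-- c.get('type'): first-match lookup on the comment's association list
def pvTypeGet? (c : List (String × String)) : Option String := (PySem.Dict.mk c).get? "type"

-- port of A: two separate counting scans, then the three-way comparison of the tallies
def classify_topic_effectiveness (comments : List (List (String × String))) : String :=
  let claim_count : Int := (comments.countP (fun c => pvTypeGet? c == some "Claim") : Int)
  let counter_count : Int :=
    (comments.countP (fun c => pvTypeGet? c == some "Counterclaim" || pvTypeGet? c == some "Rebuttal") : Int)
  if claim_count > counter_count then "Effective"
  else if claim_count == counter_count then "Adequate"
  else "Ineffective"

-- ===== PORT B =====
-- port of B: one pass accumulating a signed balance, then the sign test.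
-- c['type'] is ported as getD "type" "": exact under Pre_, which guarantees the key is present.
def classify_topic_effectiveness_alt (comments : List (List (String × String))) : String :=
  let score : Int := comments.foldl (fun s c =>
    let t := (PySem.Dict.mk c).getD "type" ""
    if t = "Claim" then s + 1
    else if t = "Counterclaim" ∨ t = "Rebuttal" then s - 1
    else s) 0
  if score > 0 then "Effective"
  else if score == 0 then "Adequate"
  else "Ineffective"

-- ===== PRECONDITION & SPEC =====
-- Pre_ excludes exactly the inputs where A raises ValueError: a comment without a 'type' key.
def Pre_classify_topic_effectiveness (comments : List (List (String × String))) : Prop :=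
  ∀ c ∈ comments, (PySem.Dict.mk c).contains "type" = true
instance (comments : List (List (String × String))) : Decidable (Pre_classify_topic_effectiveness comments) := by unfold Pre_classify_topic_effectiveness; infer_instance
def pvWitness_classify_topic_effectiveness : (List (List (String × String))) :=
  [[("type", "Claim")], [("type", "Rebuttal")]]

def Spec_classify_topic_effectiveness (comments : List (List (String × String))) (out : String) : Prop := out = classify_topic_effectiveness_alt comments
instance (comments : List (List (String × String))) (out : String) : Decidable (Spec_classify_topic_effectiveness comments out) := by unfold Spec_classify_topic_effectiveness; infer_instance

-- ===== CLAIM (what is proved, stated in full; the proofs are below) =====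
def Claim_equal_classify_topic_effectiveness : Prop := ∀ (comments : List (List (String × String))), Dom_classify_topic_effectiveness comments → Pre_classify_topic_effectiveness comments → Spec_classify_topic_effectiveness comments (classify_topic_effectiveness comments)

-- ===== LEMMAS AND PROOFS =====

-- one step of B's fold, over an arbitrary looked-up option
theorem pv_step (o : Option String) (s a b : Int) :
    (if o.getD "" = "Claim" then s + 1
     else if o.getD "" = "Counterclaim" ∨ o.getD "" = "Rebuttal" then s - 1
     else s) + a - b
    = s + (a + if o == some "Claim" then (1 : Int) else 0)
        - (b + if (o == some "Counterclaim" || o == some "Rebuttal") then (1 : Int) else 0) := by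
  cases o with
  | none => simp [Option.getD]
  | some v =>
    simp only [Option.getD, beq_iff_eq, Option.some.injEq, Bool.or_eq_true]
    by_cases h1 : v = "Claim"
    · have h2 : ¬ (v = "Counterclaim" ∨ v = "Rebuttal") := by
        rintro (h | h) <;> simp [h1] at h
      simp [h1, h2]; ring
    · by_cases h2 : v = "Counterclaim" ∨ v = "Rebuttal"
      · simp [h1]; rcases h2 with h2 | h2 <;> simp [h2] <;> ring
      · simp [h1, h2]

-- B's running balance equals (claims so far) − (counters so far)
theorem pv_score_eq (comments : List (List (String × String))) : ∀ (s : Int),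
    comments.foldl (fun s c =>
      let t := (PySem.Dict.mk c).getD "type" ""
      if t = "Claim" then s + 1
      else if t = "Counterclaim" ∨ t = "Rebuttal" then s - 1
      else s) s
    = s + (comments.countP (fun c => pvTypeGet? c == some "Claim") : Int)
        - (comments.countP (fun c => pvTypeGet? c == some "Counterclaim" || pvTypeGet? c == some "Rebuttal") : Int) := by
  induction comments with
  | nil => intro s; simp
  | cons c cs ih =>
    intro s
    simp only [List.foldl_cons, List.countP_cons, ih]
    have hget : (PySem.Dict.mk c).getD "type" "" = ((PySem.Dict.mk c).get? "type").getD "" :=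
      PySem.Dict.getD_eq_get?_getD ..
    simp only [pvTypeGet?]
    rw [hget]
    push_cast
    exact pv_step ((PySem.Dict.mk c).get? "type") s _ _

-- ===== VERDICT (by name: the statement is the Claim_ definition above) =====
theorem classify_topic_effectiveness_spec : Claim_equal_classify_topic_effectiveness := by
  intro comments hDom hPre
  clear hDom hPre
  unfold Spec_classify_topic_effectiveness classify_topic_effectiveness classify_topic_effectiveness_alt
  rw [pv_score_eq comments 0]
  set a : Int := (comments.countP (fun c => pvTypeGet? c == some "Claim") : Int) with ha
  set b : Int := (comments.countP (fun c => pvTypeGet? c == some "Counterclaim" || pvTypeGet? c == some "Rebuttal") : Int) with hb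
  simp only [beq_iff_eq, zero_add]
  split_ifs with h1 h2 h3 h4 h5 <;> first | rfl | omega
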